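-- pv_equiv track=rewrite | github.com/Johndsalas/Netrunner-Analysis | main.py | get_ltd_agenda_counts
-- ===== SOURCE A (Python) =====
-- def get_ltd_agenda_counts(agenda_counts):
--
--     ltd_agenda_counts = []
--
--     for agenda_count in agenda_counts:
--
--         threes = agenda_count[0]
--         twos = agenda_count[1]
--         ones = agenda_count[2]
--
--         if twos > 0 and twos < 4:
--
--             ones += twos
--             twos -= twos
--
--             ltd_agenda_counts.append([threes,twos,ones])
--
--         elif twos >= 4:
--
--             ones += 3
--             twos -= 3
--
--             ltd_agenda_counts.append([threes,twos,ones])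
--
--         else:
--
--             ltd_agenda_counts.append([threes,twos,ones])
--
--     return ltd_agenda_counts
-- ===== SOURCE B (Python) =====
-- def get_ltd_agenda_counts(agenda_counts):
--     # Recursive decomposition; each row drains twos into ones one unit at a
--     # time, at most three transfers, stopping when twos is exhausted.
--     if not agenda_counts:
--         return []
--     row = agenda_counts[0]
--     threes, twos, ones = row[0], row[1], row[2]
--     for _ in range(3):
--         if twos > 0:
--             twos -= 1
--             ones += 1
--     return [[threes, twos, ones]] + get_ltd_agenda_counts(agenda_counts[1:])
-- ===== Notes on version B (the rewrite author's own statement) =====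
-- stated objective: alternative
-- what changed: Replaces A's three-way branch cascade doing a bulk move with a recursion over the list whose per-row step transfers units from twos to ones one at a time via a bounded drain loop (at most 3 transfers, stopping when twos reaches 0), so no case analysis on the size of twos remains.
import Mathlib
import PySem

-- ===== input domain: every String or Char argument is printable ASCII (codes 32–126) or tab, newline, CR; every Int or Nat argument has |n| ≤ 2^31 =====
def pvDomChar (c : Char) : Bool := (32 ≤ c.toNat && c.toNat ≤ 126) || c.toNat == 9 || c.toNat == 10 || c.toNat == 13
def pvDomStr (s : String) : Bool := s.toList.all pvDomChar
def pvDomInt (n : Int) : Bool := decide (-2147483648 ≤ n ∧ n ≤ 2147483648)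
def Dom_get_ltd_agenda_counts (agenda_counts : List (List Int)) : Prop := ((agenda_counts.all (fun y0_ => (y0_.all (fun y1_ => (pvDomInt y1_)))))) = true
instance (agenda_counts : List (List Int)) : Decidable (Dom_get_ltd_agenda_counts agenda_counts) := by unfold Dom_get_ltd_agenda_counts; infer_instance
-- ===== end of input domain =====

-- B replaces A's branch cascade with structural recursion whose per-row step drains twos
-- into ones one unit at a time (a bounded 3-step loop); objective: alternative, not faster.

-- ===== PORT A =====
-- A's loop appends one row per input row; indexing ported with pyGet? (getD 0 never
-- reached inside Pre_, where every row has length ≥ 3).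
def get_ltd_agenda_counts (agenda_counts : List (List Int)) : List (List Int) :=
  agenda_counts.foldl
    (fun ltd agenda_count =>
      let threes := (PySem.List.pyGet? agenda_count 0).getD 0
      let twos := (PySem.List.pyGet? agenda_count 1).getD 0
      let ones := (PySem.List.pyGet? agenda_count 2).getD 0
      if twos > 0 ∧ twos < 4 then
        ltd ++ [[threes, twos - twos, ones + twos]]
      else if twos ≥ 4 then
        ltd ++ [[threes, twos - 3, ones + 3]]
      else
        ltd ++ [[threes, twos, ones]])
    []

-- ===== PORT B =====
-- Source B's 'for _ in range(3)' drain loop, transcribed as a fold over List.range 3.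
def pvDrain (s : Int × Int) : Int × Int :=
  (List.range 3).foldl (fun s _ => if s.1 > 0 then (s.1 - 1, s.2 + 1) else s) s

def get_ltd_agenda_counts_alt (agenda_counts : List (List Int)) : List (List Int) :=
  match agenda_counts with
  | [] => []
  | row :: rest =>
    let threes := (PySem.List.pyGet? row 0).getD 0
    let p := pvDrain ((PySem.List.pyGet? row 1).getD 0, (PySem.List.pyGet? row 2).getD 0)
    [[threes, p.1, p.2]] ++ get_ltd_agenda_counts_alt rest

-- ===== PRECONDITION & SPEC =====
-- Pre_ excludes inputs containing a row with fewer than 3 entries, on which the Python A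
-- (and B alike) raises IndexError.
def Pre_get_ltd_agenda_counts (agenda_counts : List (List Int)) : Prop :=
  ∀ row ∈ agenda_counts, 3 ≤ row.length
instance (agenda_counts : List (List Int)) : Decidable (Pre_get_ltd_agenda_counts agenda_counts) := by unfold Pre_get_ltd_agenda_counts; infer_instance

def pvWitness_get_ltd_agenda_counts : List (List Int) := [[1, 2, 3], [0, 5, 1], [2, -1, 0]]

def Spec_get_ltd_agenda_counts (agenda_counts : List (List Int)) (out : List (List Int)) : Prop := out = get_ltd_agenda_counts_alt agenda_counts
instance (agenda_counts : List (List Int)) (out : List (List Int)) : Decidable (Spec_get_ltd_agenda_counts agenda_counts out) := by unfold Spec_get_ltd_agenda_counts; infer_instance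

-- ===== CLAIM (what is proved, stated in full; the proofs are below) =====
def Claim_equal_get_ltd_agenda_counts : Prop := ∀ (agenda_counts : List (List Int)), Dom_get_ltd_agenda_counts agenda_counts → Pre_get_ltd_agenda_counts agenda_counts → Spec_get_ltd_agenda_counts agenda_counts (get_ltd_agenda_counts agenda_counts)

-- ===== LEMMAS AND PROOFS =====

-- The three-step drain equals A's branch result (pure arithmetic on any row values).
theorem pv_drain_eq (tw on : Int) :
    pvDrain (tw, on)
    = (if tw > 0 ∧ tw < 4 then (tw - tw, on + tw)
       else if tw ≥ 4 then (tw - 3, on + 3)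
       else (tw, on)) := by
  unfold pvDrain
  simp only [show List.range 3 = [0, 1, 2] by decide, List.foldl_cons, List.foldl_nil]
  split_ifs <;> simp_all <;> omega

-- A's foldl with an append-accumulator equals B's recursion prefixed by the accumulator.
theorem pv_foldl_eq (l acc : List (List Int)) :
    l.foldl
      (fun ltd agenda_count =>
        let threes := (PySem.List.pyGet? agenda_count 0).getD 0
        let twos := (PySem.List.pyGet? agenda_count 1).getD 0
        let ones := (PySem.List.pyGet? agenda_count 2).getD 0
        if twos > 0 ∧ twos < 4 then
          ltd ++ [[threes, twos - twos, ones + twos]]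
        else if twos ≥ 4 then
          ltd ++ [[threes, twos - 3, ones + 3]]
        else
          ltd ++ [[threes, twos, ones]])
      acc
    = acc ++ get_ltd_agenda_counts_alt l := by
  induction l generalizing acc with
  | nil => simp [get_ltd_agenda_counts_alt]
  | cons hd tl ih =>
    simp only [List.foldl_cons, get_ltd_agenda_counts_alt]
    rw [ih, pv_drain_eq]
    split_ifs <;> simp

-- ===== VERDICT (by name: the statement is the Claim_ definition above) =====
theorem get_ltd_agenda_counts_spec : Claim_equal_get_ltd_agenda_counts := by
  intro agenda_counts _ _
  unfold Spec_get_ltd_agenda_counts get_ltd_agenda_counts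
  rw [pv_foldl_eq]
  simp
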